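-- pv_equiv track=rewrite | github.com/gabrielsilva28/Trabalho01HIP | hip_trabalho01/trabalho01.py | pesquisar
-- ===== SOURCE A (Python) =====
-- def pesquisar(term,lista_separa):
--     resultado = {}
--     if term in lista_separa:
--         for id_texto in lista_separa[term]['titulo']:
--             if id_texto in resultado:
--                 resultado[id_texto]['titulo'] += 1
--             else:
--                 resultado[id_texto] = {'titulo': 1, 'texto': 0}
--         for id_texto in lista_separa[term]['texto']:
--             if id_texto in resultado:
--                 resultado[id_texto]['texto'] += 1
--             else:
--                 resultado[id_texto] = {'titulo': 0, 'texto': 1}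
--     return resultado
-- ===== SOURCE B (Python) =====
-- def pesquisar(term, lista_separa):
--     if term not in lista_separa:
--         return {}
--     entrada = lista_separa[term]
--     tc = {}
--     for i in entrada['titulo']:
--         tc[i] = tc.get(i, 0) + 1
--     xc = {}
--     for i in entrada['texto']:
--         xc[i] = xc.get(i, 0) + 1
--     resultado = {i: {'titulo': c, 'texto': xc.pop(i, 0)} for i, c in tc.items()}
--     for i, c in xc.items():
--         resultado[i] = {'titulo': 0, 'texto': c}
--     return resultado
-- ===== Notes on version B (the rewrite author's own statement) =====
-- stated objective: alternative
-- what changed: A builds the result dict incrementally with an increment-or-initialize branch per occurrence; B first counts titulo and texto occurrences into two counters and then assembles the result in two phases (titulo keys with texto counts popped from the second counter, then the leftover texto-only keys), preserving A's insertion order.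
-- outside the precondition, e.g. on pesquisar('a', {'a': {'titulo': ['x']}}): A raises KeyError, B raises KeyError
import Mathlib
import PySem

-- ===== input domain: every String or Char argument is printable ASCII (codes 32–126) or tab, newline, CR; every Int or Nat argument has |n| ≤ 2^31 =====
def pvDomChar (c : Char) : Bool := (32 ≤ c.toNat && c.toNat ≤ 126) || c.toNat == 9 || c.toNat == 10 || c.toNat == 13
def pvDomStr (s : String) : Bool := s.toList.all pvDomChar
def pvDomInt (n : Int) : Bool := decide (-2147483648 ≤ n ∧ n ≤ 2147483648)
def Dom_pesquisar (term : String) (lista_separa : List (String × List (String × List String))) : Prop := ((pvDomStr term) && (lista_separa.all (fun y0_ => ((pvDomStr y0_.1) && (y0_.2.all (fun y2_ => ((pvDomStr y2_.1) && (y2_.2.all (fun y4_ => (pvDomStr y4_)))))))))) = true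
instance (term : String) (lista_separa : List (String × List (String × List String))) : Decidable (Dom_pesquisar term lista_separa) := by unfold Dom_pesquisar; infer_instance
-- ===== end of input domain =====

-- B replaces A's incremental increment-or-initialize build by count-then-assemble (two
-- counters, then two assembly phases); alternative decomposition, same cost, return value
-- proved identical on Pre_ (inputs on which A does not raise KeyError).

-- ===== PORT A =====
-- first-match lookup on an association list: Python `d[k]` / `k in d` (exact: dict lookup)
def pvLookup {ν : Type} (l : List (String × ν)) (k : String) : Option ν :=
  (l.find? (fun p => p.1 == k)).map (·.2)

-- `resultado[id]['titulo'] += 1` on the inner dict: the key is always present (the value was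
-- created with both keys), so overwrite-in-place on the association list is exact
def pvIncT (v : List (String × Int)) : List (String × Int) :=
  v.map (fun p => if p.1 == "titulo" then (p.1, p.2 + 1) else p)
def pvIncX (v : List (String × Int)) : List (String × Int) :=
  v.map (fun p => if p.1 == "texto" then (p.1, p.2 + 1) else p)

-- one iteration of A's first loop: increment existing entry's 'titulo' or create {'titulo':1,'texto':0}
def pvStepT (r : PySem.Dict String (List (String × Int))) (i : String) :
    PySem.Dict String (List (String × Int)) :=
  if r.contains i then r.modify i [] pvIncT else r.insert i [("titulo", 1), ("texto", 0)]

-- one iteration of A's second loop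
def pvStepX (r : PySem.Dict String (List (String × Int))) (i : String) :
    PySem.Dict String (List (String × Int)) :=
  if r.contains i then r.modify i [] pvIncX else r.insert i [("titulo", 0), ("texto", 1)]

def pesquisar (term : String) (lista_separa : List (String × List (String × List String))) :
    List (String × List (String × Int)) :=
  let resultado : PySem.Dict String (List (String × Int)) := PySem.Dict.empty
  match pvLookup lista_separa term with
  | none => resultado.items
  | some entry =>
    -- entry['titulo'] / entry['texto']: Pre_ guarantees both keys exist (KeyError otherwise)
    let tit := (pvLookup entry "titulo").getD []
    let tex := (pvLookup entry "texto").getD []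
    let r1 := tit.foldl pvStepT resultado
    let r2 := tex.foldl pvStepX r1
    r2.items

-- ===== PORT B =====
-- one step of the comprehension `{i: {'titulo': c, 'texto': xc.pop(i, 0)} for i, c in tc.items()}`:
-- state is (resultado-so-far, xc); xc.pop(i, 0) = (xc.get(i, 0), del xc[i])
def pvStepB (p : PySem.Dict String (List (String × Int)) × PySem.Dict String Int)
    (it : String × Int) :
    PySem.Dict String (List (String × Int)) × PySem.Dict String Int :=
  (p.1.insert it.1 [("titulo", it.2), ("texto", p.2.getD it.1 0)], p.2.erase it.1)

def pesquisar_alt (term : String) (lista_separa : List (String × List (String × List String))) :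
    List (String × List (String × Int)) :=
  match pvLookup lista_separa term with
  | none => []
  | some entrada =>
    let tc := ((pvLookup entrada "titulo").getD []).foldl
        (fun d i => d.insert i (d.getD i 0 + 1)) PySem.Dict.empty
    let xc := ((pvLookup entrada "texto").getD []).foldl
        (fun d i => d.insert i (d.getD i 0 + 1)) PySem.Dict.empty
    let p := tc.items.foldl pvStepB (PySem.Dict.empty, xc)
    let resultado := p.2.items.foldl
        (fun r it => r.insert it.1 [("titulo", 0), ("texto", it.2)]) p.1
    resultado.items

-- ===== PRECONDITION & SPEC =====
-- Pre_ excludes ONLY inputs on which Python A raises KeyError (and B too): term is a key but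
-- its entry lacks the inner key "titulo" or "texto"; on every input A returns on, Pre_ holds.
def Pre_pesquisar (term : String) (lista_separa : List (String × List (String × List String))) : Prop :=
  ((pvLookup lista_separa term).all
    (fun e => (pvLookup e "titulo").isSome && (pvLookup e "texto").isSome)) = true
instance (term : String) (lista_separa : List (String × List (String × List String))) : Decidable (Pre_pesquisar term lista_separa) := by unfold Pre_pesquisar; infer_instance

def pvWitness_pesquisar : String × (List (String × List (String × List String))) :=
  ("a", [("a", [("titulo", ["x", "x", "y"]), ("texto", ["y", "z"])])])

def Spec_pesquisar (term : String) (lista_separa : List (String × List (String × List String))) (out : List (String × List (String × Int))) : Prop := out = pesquisar_alt term lista_separa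
instance (term : String) (lista_separa : List (String × List (String × List String))) (out : List (String × List (String × Int))) : Decidable (Spec_pesquisar term lista_separa out) := by unfold Spec_pesquisar; infer_instance

-- ===== CLAIM (what is proved, stated in full; the proofs are below) =====
def Claim_equal_pesquisar : Prop := ∀ (term : String) (lista_separa : List (String × List (String × List String))), Dom_pesquisar term lista_separa → Pre_pesquisar term lista_separa → Spec_pesquisar term lista_separa (pesquisar term lista_separa)

-- ===== LEMMAS AND PROOFS =====

-- the canonical value both sides compute: ids in order of first appearance (titulo pass, then
-- texto pass), each mapped to its two occurrence counts
def pvCanon (tit tex : List String) : List (String × List (String × Int)) :=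
  (PySem.Set.update (PySem.Set.ofList tit) tex).map
    (fun k => (k, [("titulo", (tit.count k : Int)), ("texto", (tex.count k : Int))]))

lemma pvIncT_pair (t x : Int) :
    pvIncT [("titulo", t), ("texto", x)] = [("titulo", t + 1), ("texto", x)] := by
  simp [pvIncT]

lemma pvIncX_pair (t x : Int) :
    pvIncX [("titulo", t), ("texto", x)] = [("titulo", t), ("texto", x + 1)] := by
  simp [pvIncX]

lemma pvFstComp (c : String → Int) :
    ((fun x : String × Int => x.1) ∘ fun k : String => (k, c k)) = fun k => k := rfl
lemma pvFstComp2 (c : String → List (String × Int)) :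
    ((fun x : String × List (String × Int) => x.1) ∘ fun k : String => (k, c k)) = fun k => k := rfl

lemma keys_stepT (r : PySem.Dict String (List (String × Int))) (i : String) :
    (pvStepT r i).keys = PySem.Set.add r.keys i := by
  unfold pvStepT PySem.Set.add
  by_cases h : r.contains i
  · rw [if_pos h, if_pos ?_, PySem.Dict.keys_modify, PySem.Dict.keys_insert_of_contains _ _ h]
    rw [PySem.Set.contains]
    simp only [List.contains_iff_mem]
    exact (PySem.Dict.contains_iff_mem_keys r i).mp h
  · rw [if_neg h, if_neg ?_, PySem.Dict.keys_insert_of_not_contains _ _ (by simpa using h)]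
    rw [PySem.Set.contains]
    simp only [List.contains_iff_mem]
    simpa using fun hm => h ((PySem.Dict.contains_iff_mem_keys r i).mpr hm)

lemma keys_stepX (r : PySem.Dict String (List (String × Int))) (i : String) :
    (pvStepX r i).keys = PySem.Set.add r.keys i := by
  unfold pvStepX PySem.Set.add
  by_cases h : r.contains i
  · rw [if_pos h, if_pos ?_, PySem.Dict.keys_modify, PySem.Dict.keys_insert_of_contains _ _ h]
    rw [PySem.Set.contains]
    simp only [List.contains_iff_mem]
    exact (PySem.Dict.contains_iff_mem_keys r i).mp h
  · rw [if_neg h, if_neg ?_, PySem.Dict.keys_insert_of_not_contains _ _ (by simpa using h)]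
    rw [PySem.Set.contains]
    simp only [List.contains_iff_mem]
    simpa using fun hm => h ((PySem.Dict.contains_iff_mem_keys r i).mpr hm)

lemma keys_foldT (L : List String) :
    ∀ r : PySem.Dict String (List (String × Int)),
    (L.foldl pvStepT r).keys = PySem.Set.update r.keys L := by
  induction L with
  | nil => intro r; rfl
  | cons i L ih =>
    intro r
    rw [List.foldl_cons, ih, PySem.Set.update_cons, keys_stepT]

lemma keys_foldX (L : List String) :
    ∀ r : PySem.Dict String (List (String × Int)),
    (L.foldl pvStepX r).keys = PySem.Set.update r.keys L := by
  induction L with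
  | nil => intro r; rfl
  | cons i L ih =>
    intro r
    rw [List.foldl_cons, ih, PySem.Set.update_cons, keys_stepX]

lemma nodup_stepT (r : PySem.Dict String (List (String × Int))) (i : String)
    (h : r.keys.Nodup) : (pvStepT r i).keys.Nodup := by
  unfold pvStepT PySem.Dict.modify
  split_ifs <;> exact PySem.Dict.nodup_keys_insert _ _ _ h

lemma nodup_stepX (r : PySem.Dict String (List (String × Int))) (i : String)
    (h : r.keys.Nodup) : (pvStepX r i).keys.Nodup := by
  unfold pvStepX PySem.Dict.modify
  split_ifs <;> exact PySem.Dict.nodup_keys_insert _ _ _ h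

lemma nodup_foldT (L : List String) :
    ∀ r : PySem.Dict String (List (String × Int)), r.keys.Nodup →
    (L.foldl pvStepT r).keys.Nodup := by
  induction L with
  | nil => intro r h; exact h
  | cons i L ih => intro r h; exact ih _ (nodup_stepT r i h)

lemma nodup_foldX (L : List String) :
    ∀ r : PySem.Dict String (List (String × Int)), r.keys.Nodup →
    (L.foldl pvStepX r).keys.Nodup := by
  induction L with
  | nil => intro r h; exact h
  | cons i L ih => intro r h; exact ih _ (nodup_stepX r i h)

-- invariant of A's first loop: values track 'titulo' counts, 'texto' components unchanged
lemma foldT_spec (L : List String) :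
    ∀ (d : PySem.Dict String (List (String × Int))) (a b : String → Int),
    d.keys.Nodup →
    (∀ j ∈ d.keys, d.getD j [] = [("titulo", a j), ("texto", b j)]) →
    ∀ j ∈ (L.foldl pvStepT d).keys,
      (L.foldl pvStepT d).getD j [] =
        [("titulo", (if j ∈ d.keys then a j else 0) + (L.count j : Int)),
         ("texto", if j ∈ d.keys then b j else 0)] := by
  induction L with
  | nil =>
    intro d a b hnd hv j hj
    simp only [List.foldl_nil] at hj ⊢
    rw [hv j hj, if_pos hj, if_pos hj]
    simp
  | cons i L ih =>
    intro d a b hnd hv j hj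
    simp only [List.foldl_cons] at hj ⊢
    by_cases hc : d.contains i
    · have hik : i ∈ d.keys := (PySem.Dict.contains_iff_mem_keys d i).mp hc
      have hstep : pvStepT d i = d.insert i (pvIncT (d.getD i [])) := by
        unfold pvStepT PySem.Dict.modify; rw [if_pos hc]
      have hkeys : (pvStepT d i).keys = d.keys := by
        rw [hstep, PySem.Dict.keys_insert_of_contains _ _ hc]
      have hnd' : (pvStepT d i).keys.Nodup := by rw [hkeys]; exact hnd
      have hv' : ∀ j' ∈ (pvStepT d i).keys, (pvStepT d i).getD j' [] =
          [("titulo", (fun j' => if j' = i then a j' + 1 else a j') j'), ("texto", b j')] := by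
        intro j' hj'
        rw [hkeys] at hj'
        rw [hstep, PySem.Dict.getD_insert]
        beta_reduce
        by_cases hji : j' = i
        · subst hji
          rw [if_pos rfl, if_pos rfl, hv j' hj', pvIncT_pair]
        · rw [if_neg hji, if_neg hji, hv j' hj']
      have := ih (pvStepT d i) _ b hnd' hv' j hj
      have hcnt : ((i :: L).count j : Int) = (L.count j : Int) + (if j = i then 1 else 0) := by
        by_cases h : j = i
        · subst h; simp
        · simp [h, Ne.symm h]
      rw [this, hkeys, hcnt]
      by_cases hjk : j ∈ d.keys <;> by_cases hji : j = i <;>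
        first
        | (simp_all; ring)
        | simp_all
    · have hstep : pvStepT d i = d.insert i [("titulo", 1), ("texto", 0)] := by
        unfold pvStepT; rw [if_neg (by simpa using hc)]
      have hcf : d.contains i = false := by simpa using hc
      have hik : i ∉ d.keys := fun hm => hc ((PySem.Dict.contains_iff_mem_keys d i).mpr hm)
      have hkeys : (pvStepT d i).keys = d.keys ++ [i] := by
        rw [hstep, PySem.Dict.keys_insert_of_not_contains _ _ hcf]
      have hnd' : (pvStepT d i).keys.Nodup := by
        rw [hstep]; exact PySem.Dict.nodup_keys_insert _ _ _ hnd
      have hv' : ∀ j' ∈ (pvStepT d i).keys, (pvStepT d i).getD j' [] =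
          [("titulo", (fun j' => if j' = i then 1 else a j') j'),
           ("texto", (fun j' => if j' = i then 0 else b j') j')] := by
        intro j' hj'
        rw [hstep, PySem.Dict.getD_insert]
        beta_reduce
        by_cases hji : j' = i
        · rw [if_pos hji, if_pos hji, if_pos hji]
        · rw [hkeys] at hj'
          rcases List.mem_append.mp hj' with h | h
          · rw [if_neg hji, if_neg hji, if_neg hji, hv j' h]
          · exact absurd (List.mem_singleton.mp h) hji
      have := ih (pvStepT d i) _ _ hnd' hv' j hj
      have hcnt : ((i :: L).count j : Int) = (L.count j : Int) + (if j = i then 1 else 0) := by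
        by_cases h : j = i
        · subst h; simp
        · simp [h, Ne.symm h]
      rw [this, hkeys, hcnt]
      by_cases hjk : j ∈ d.keys <;> by_cases hji : j = i <;>
        first
        | (simp_all; ring)
        | simp_all

-- invariant of A's second loop: values track 'texto' counts, 'titulo' components unchanged
lemma foldX_spec (L : List String) :
    ∀ (d : PySem.Dict String (List (String × Int))) (a b : String → Int),
    d.keys.Nodup →
    (∀ j ∈ d.keys, d.getD j [] = [("titulo", a j), ("texto", b j)]) →
    ∀ j ∈ (L.foldl pvStepX d).keys,
      (L.foldl pvStepX d).getD j [] =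
        [("titulo", if j ∈ d.keys then a j else 0),
         ("texto", (if j ∈ d.keys then b j else 0) + (L.count j : Int))] := by
  induction L with
  | nil =>
    intro d a b hnd hv j hj
    simp only [List.foldl_nil] at hj ⊢
    rw [hv j hj, if_pos hj, if_pos hj]
    simp
  | cons i L ih =>
    intro d a b hnd hv j hj
    simp only [List.foldl_cons] at hj ⊢
    by_cases hc : d.contains i
    · have hik : i ∈ d.keys := (PySem.Dict.contains_iff_mem_keys d i).mp hc
      have hstep : pvStepX d i = d.insert i (pvIncX (d.getD i [])) := by
        unfold pvStepX PySem.Dict.modify; rw [if_pos hc]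
      have hkeys : (pvStepX d i).keys = d.keys := by
        rw [hstep, PySem.Dict.keys_insert_of_contains _ _ hc]
      have hnd' : (pvStepX d i).keys.Nodup := by rw [hkeys]; exact hnd
      have hv' : ∀ j' ∈ (pvStepX d i).keys, (pvStepX d i).getD j' [] =
          [("titulo", a j'), ("texto", (fun j' => if j' = i then b j' + 1 else b j') j')] := by
        intro j' hj'
        rw [hkeys] at hj'
        rw [hstep, PySem.Dict.getD_insert]
        beta_reduce
        by_cases hji : j' = i
        · subst hji
          rw [if_pos rfl, if_pos rfl, hv j' hj', pvIncX_pair]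
        · rw [if_neg hji, if_neg hji, hv j' hj']
      have := ih (pvStepX d i) a _ hnd' hv' j hj
      have hcnt : ((i :: L).count j : Int) = (L.count j : Int) + (if j = i then 1 else 0) := by
        by_cases h : j = i
        · subst h; simp
        · simp [h, Ne.symm h]
      rw [this, hkeys, hcnt]
      by_cases hjk : j ∈ d.keys <;> by_cases hji : j = i <;>
        first
        | (simp_all; ring)
        | simp_all
    · have hstep : pvStepX d i = d.insert i [("titulo", 0), ("texto", 1)] := by
        unfold pvStepX; rw [if_neg (by simpa using hc)]
      have hcf : d.contains i = false := by simpa using hc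
      have hik : i ∉ d.keys := fun hm => hc ((PySem.Dict.contains_iff_mem_keys d i).mpr hm)
      have hkeys : (pvStepX d i).keys = d.keys ++ [i] := by
        rw [hstep, PySem.Dict.keys_insert_of_not_contains _ _ hcf]
      have hnd' : (pvStepX d i).keys.Nodup := by
        rw [hstep]; exact PySem.Dict.nodup_keys_insert _ _ _ hnd
      have hv' : ∀ j' ∈ (pvStepX d i).keys, (pvStepX d i).getD j' [] =
          [("titulo", (fun j' => if j' = i then 0 else a j') j'),
           ("texto", (fun j' => if j' = i then 1 else b j') j')] := by
        intro j' hj'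
        rw [hstep, PySem.Dict.getD_insert]
        beta_reduce
        by_cases hji : j' = i
        · rw [if_pos hji, if_pos hji, if_pos hji]
        · rw [hkeys] at hj'
          rcases List.mem_append.mp hj' with h | h
          · rw [if_neg hji, if_neg hji, if_neg hji, hv j' h]
          · exact absurd (List.mem_singleton.mp h) hji
      have := ih (pvStepX d i) _ _ hnd' hv' j hj
      have hcnt : ((i :: L).count j : Int) = (L.count j : Int) + (if j = i then 1 else 0) := by
        by_cases h : j = i
        · subst h; simp
        · simp [h, Ne.symm h]
      rw [this, hkeys, hcnt]
      by_cases hjk : j ∈ d.keys <;> by_cases hji : j = i <;>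
        first
        | (simp_all; ring)
        | simp_all

-- A's result in canonical form
lemma A_char (tit tex : List String) :
    (tex.foldl pvStepX (tit.foldl pvStepT PySem.Dict.empty)).items = pvCanon tit tex := by
  set r1 := tit.foldl pvStepT PySem.Dict.empty with hr1
  set r2 := tex.foldl pvStepX r1 with hr2
  have hk0 : (PySem.Dict.empty : PySem.Dict String (List (String × Int))).keys = [] :=
    PySem.Dict.keys_empty
  have hn0 : (PySem.Dict.empty : PySem.Dict String (List (String × Int))).keys.Nodup := by
    rw [hk0]; exact List.nodup_nil
  have hk1 : r1.keys = PySem.Set.ofList tit := by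
    rw [hr1, keys_foldT, hk0, PySem.Set.update_nil_left]
  have hn1 : r1.keys.Nodup := nodup_foldT tit _ hn0
  have hv1 : ∀ j ∈ r1.keys, r1.getD j [] =
      [("titulo", (tit.count j : Int)), ("texto", (0 : Int))] := by
    intro j hj
    have := foldT_spec tit PySem.Dict.empty (fun _ => 0) (fun _ => 0) hn0
      (by intro j' hj'; rw [hk0] at hj'; exact absurd hj' (List.not_mem_nil)) j hj
    rw [this, hk0]
    simp
  have hk2 : r2.keys = PySem.Set.update (PySem.Set.ofList tit) tex := by
    rw [hr2, keys_foldX, hk1]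
  have hn2 : r2.keys.Nodup := nodup_foldX tex _ hn1
  have hv2 : ∀ j ∈ r2.keys, r2.getD j [] =
      [("titulo", (tit.count j : Int)), ("texto", (tex.count j : Int))] := by
    intro j hj
    have := foldX_spec tex r1 (fun k => (tit.count k : Int)) (fun _ => 0) hn1 hv1 j hj
    rw [this]
    by_cases hm : j ∈ r1.keys
    · rw [if_pos hm, if_pos hm]
      simp
    · rw [if_neg hm, if_neg hm]
      have : j ∉ tit := by
        rw [hk1] at hm
        exact fun h => hm ((PySem.Set.mem_ofList tit j).mpr h)
      rw [List.count_eq_zero.mpr this]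
      simp
  rw [PySem.Dict.items_eq_map_keys r2 hn2 [], hk2]
  unfold pvCanon
  apply List.map_congr_left
  intro k hk
  rw [← hk2] at hk
  rw [hv2 k hk]

lemma get?_erase_of_ne {ν : Type} (d : PySem.Dict String ν) {k j : String} (h : j ≠ k) :
    (d.erase k).get? j = d.get? j := by
  obtain ⟨l⟩ := d
  show (PySem.Dict.erase ⟨l⟩ k).get? j = PySem.Dict.get? ⟨l⟩ j
  unfold PySem.Dict.erase PySem.Dict.get?
  induction l with
  | nil => rfl
  | cons p l ih =>
    by_cases hp : p.1 = k
    · have hj : (p.1 == j) = false := by simp [hp, Ne.symm h]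
      simp only [List.filter_cons, hp]
      simp only [List.find?_cons, hj]
      simpa using ih
    · simp only [List.filter_cons]
      rw [if_pos (by simp [hp])]
      by_cases hj : p.1 = j
      · simp [hj]
      · simp only [List.find?_cons, show (p.1 == j) = false by simp [hj]]
        simpa using ih

-- invariant of B's comprehension loop: resultado collects the tc-entries (texto looked up in
-- the ORIGINAL xc, since keys are distinct), xc keeps exactly the entries with keys not in tc
lemma foldB_spec (its : List (String × Int)) :
    ∀ (r : PySem.Dict String (List (String × Int))) (x : PySem.Dict String Int),
    (∀ k ∈ its.map (·.1), r.contains k = false) → (its.map (·.1)).Nodup →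
    (its.foldl pvStepB (r, x)).1.items =
      r.items ++ its.map (fun it => (it.1, [("titulo", it.2), ("texto", x.getD it.1 0)]))
    ∧ (its.foldl pvStepB (r, x)).2.items =
      x.items.filter (fun q => decide (q.1 ∉ its.map (·.1))) := by
  induction its with
  | nil =>
    intro r x _ _
    constructor
    · simp
    · simp
  | cons it its ih =>
    intro r x hfresh hnd
    simp only [List.map_cons, List.nodup_cons] at hnd
    have hfhead : r.contains it.1 = false := hfresh it.1 (by simp)
    have hfresh' : ∀ k ∈ its.map (·.1),
        (r.insert it.1 [("titulo", it.2), ("texto", x.getD it.1 0)]).contains k = false := by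
      intro k hk
      rw [PySem.Dict.contains_insert]
      have hne : (k == it.1) = false := by
        simp only [beq_eq_false_iff_ne, ne_eq]
        exact fun he => hnd.1 (he ▸ hk)
      rw [hne, hfresh k (by simp [hk])]
      rfl
    have step : (it :: its).foldl pvStepB (r, x) =
        its.foldl pvStepB
          (r.insert it.1 [("titulo", it.2), ("texto", x.getD it.1 0)], x.erase it.1) := rfl
    obtain ⟨ih1, ih2⟩ := ih _ (x.erase it.1) hfresh' hnd.2
    constructor
    · rw [step, ih1, PySem.Dict.items_insert_of_not_contains _ _ hfhead]
      rw [List.append_assoc, List.map_cons]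
      congr 1
      rw [List.singleton_append]
      congr 1
      apply List.map_congr_left
      intro a ha
      have hane : a.1 ≠ it.1 := fun he => hnd.1 (he ▸ (List.mem_map_of_mem ha))
      have : (x.erase it.1).getD a.1 0 = x.getD a.1 0 := by
        unfold PySem.Dict.getD
        rw [get?_erase_of_ne _ hane]
      rw [this]
    · rw [step, ih2]
      show (x.items.filter (fun p => !(p.1 == it.1))).filter _ = _
      rw [List.filter_filter]
      apply List.filter_congr
      intro q _
      by_cases h1 : q.1 = it.1
      · simp [h1]
      · by_cases h2 : q.1 ∈ its.map (·.1) <;> simp [h1, h2]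

-- B's result in canonical form
lemma B_char (tit tex : List String) :
    (let tc := tit.foldl (fun d i => d.insert i (d.getD i 0 + 1)) PySem.Dict.empty
     let xc := tex.foldl (fun d i => d.insert i (d.getD i 0 + 1)) PySem.Dict.empty
     let p := tc.items.foldl pvStepB (PySem.Dict.empty, xc)
     (p.2.items.foldl (fun r it => r.insert it.1 [("titulo", 0), ("texto", it.2)]) p.1).items)
    = pvCanon tit tex := by
  rw [PySem.Dict.foldl_insert_getD_add_one_eq_counter tit,
      PySem.Dict.foldl_insert_getD_add_one_eq_counter tex]
  set tc := PySem.Dict.counter tit with htc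
  set xc := PySem.Dict.counter tex with hxc
  have htci : tc.items = (PySem.Set.ofList tit).map (fun k => (k, (tit.count k : Int))) :=
    PySem.Dict.items_counter tit
  have hxci : xc.items = (PySem.Set.ofList tex).map (fun k => (k, (tex.count k : Int))) :=
    PySem.Dict.items_counter tex
  have hkeys : tc.items.map (·.1) = PySem.Set.ofList tit := by
    rw [htci, List.map_map, pvFstComp, List.map_id']
  have hndk : (tc.items.map (·.1)).Nodup := by
    rw [hkeys]; exact PySem.Set.nodup_ofList tit
  have hfresh : ∀ k ∈ tc.items.map (·.1),
      (PySem.Dict.empty : PySem.Dict String (List (String × Int))).contains k = false := by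
    intro k _; rfl
  obtain ⟨h1, h2⟩ := foldB_spec tc.items PySem.Dict.empty xc hfresh hndk
  set p := tc.items.foldl pvStepB (PySem.Dict.empty, xc) with hp
  have hemp : (PySem.Dict.empty : PySem.Dict String (List (String × Int))).items = [] := rfl
  -- first component in canonical form over the titulo keys
  have h1' : p.1.items = (PySem.Set.ofList tit).map
      (fun k => (k, [("titulo", (tit.count k : Int)), ("texto", (tex.count k : Int))])) := by
    rw [h1, hemp, List.nil_append, htci, List.map_map]
    apply List.map_congr_left
    intro k _
    simp only [Function.comp]
    rw [hxc, PySem.Dict.getD_counter]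
  -- second component: the texto-only keys with their counts
  have h2' : p.2.items = ((PySem.Set.ofList tex).filter
      (fun k => decide (k ∉ PySem.Set.ofList tit))).map
      (fun k => (k, (tex.count k : Int))) := by
    rw [h2, hkeys, hxci, List.filter_map]
    rfl
  have hp1keys : p.1.keys = PySem.Set.ofList tit := by
    show p.1.items.map (·.1) = _
    rw [h1', List.map_map, pvFstComp2, List.map_id']
  have hfresh2 : ∀ a ∈ p.2.items, p.1.contains a.1 = false := by
    intro a ha
    rw [h2'] at ha
    obtain ⟨k, hk, rfl⟩ := List.mem_map.mp ha
    have hknot : k ∉ PySem.Set.ofList tit := by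
      have := (List.mem_filter.mp hk).2
      simpa using this
    rw [← Bool.not_eq_true]
    intro hcon
    exact hknot (by rw [← hp1keys]; exact (PySem.Dict.contains_iff_mem_keys _ _).mp hcon)
  have hnd2 : (p.2.items.map (·.1)).Nodup := by
    rw [h2', List.map_map, pvFstComp, List.map_id']
    exact (PySem.Set.nodup_ofList tex).filter _
  rw [PySem.Dict.items_foldl_insert_fresh p.2.items (·.1)
      (fun it => [("titulo", 0), ("texto", it.2)]) p.1 hfresh2 hnd2]
  rw [h1', h2', List.map_map]
  unfold pvCanon
  rw [PySem.Set.update_eq_append_filter, List.map_append]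
  congr 1
  have hpred : ∀ y ∈ (PySem.Set.ofList tex : List String),
      (!(PySem.Set.ofList tit).contains y) = decide (y ∉ PySem.Set.ofList tit) := by
    intro y _
    by_cases hy : y ∈ PySem.Set.ofList tit
    · simp [hy, PySem.Set.contains]
    · simp [hy, PySem.Set.contains]
  rw [List.filter_congr hpred]
  apply List.map_congr_left
  intro k hk
  have hknot : k ∉ tit := by
    have h2f := (List.mem_filter.mp hk).2
    have hx : k ∉ PySem.Set.ofList tit := by simpa using h2f
    intro h
    exact hx ((PySem.Set.mem_ofList tit k).mpr h)
  simp only [Function.comp]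
  rw [List.count_eq_zero.mpr hknot]
  rfl

-- ===== VERDICT (by name: the statement is the Claim_ definition above) =====
theorem pesquisar_spec : Claim_equal_pesquisar := by
  intro term ls _hdom _hpre
  unfold Spec_pesquisar pesquisar pesquisar_alt
  cases h : pvLookup ls term with
  | none => rfl
  | some entry => simpa using (A_char ((pvLookup entry "titulo").getD [])
      ((pvLookup entry "texto").getD [])).trans (B_char _ _).symm
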